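/- GENERATED by tools/from_farm_form.py from prooffarm-gif/accepted/DGifDecompressLine.8/Lemmas.lean (a worked proof of the farm's unit `DGifDecompressLine.8`,
   accepted by the verdict) — do not edit. -/
import Gif.Spec.Units.DGifDecompressLine_8
import Gif.Spec.AllSegs

/-!
  Lemmas for the unit `DGifDecompressLine.8` (segment 8 of the LZW decoder, dgif_lib.c:934-938: the arm
  `CrntCode == RunningCode - 2` of l.932): the segment is walked in TWO STEPS that meet at the return address 0x106db7 (`ret21`)
  of the call of DGifGetPrefixChar. The assertion there is `Mid` again, at the label `ret21`: everything `Mid` speaks of is a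
  callee-saved register (`rbx rbp r13 r14`) or memory the callee does not touch (it writes only its own stack, below the body's
  stack pointer: a `Scratch` window of `Body.carry`).

      dl8_seg_call     0x106da7 … the call of DGifGetPrefixChar … 0x106db7: `Mid at_106da7` → `Mid ret21`
      dl8_seg_tail     0x106db7 … 0x106e4b: `Mid ret21` → `Trace at_106e4b` with `k = 4094`

  The general lemmas are those of Gif/Spec/LzwCarry.lean (`Body.carry`, `dl_scratch`, `Body.pv_inside` …), Gif/Spec/FrameCarry.lean
  (`Env.at_call`), Gif/Spec/Common.lean §6 (`stackLive`, `suffixLive`) and Gif/Spec/Words.lean (`sext32_small`, `sext32_bv`,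
  `lea32_succ`, `toNat_ofBV_ofNat32`).
-/

open X86 X86.User Asan ProgX.Base ProgX.Base.Spec Gif.Spec

set_option maxRecDepth 4000
set_option maxHeartbeats 4000000

namespace Gif.Spec.DGifDecompressLine_8

/-- **106DA7H … the call of DGifGetPrefixChar … 106DB7H (ret21)** (dgif_lib.c:936 `DGifGetPrefixChar(Prefix, LastCode, ClearCode)`):
`edx = ClearCode` from `[rsp+10H]` (not negative by [LZ2]: `ClearCode ≤ 256`), `esi = LastCode` from `[rsp+14H]` (any value: the
callee is total in it), `rdi = r13 = Prefix`. The callee stores nothing but its own stack: `Mid` holds again at its return. -/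
theorem dl8_seg_call (Lay : Layout) (hLay : Lay.hi = 0x1000000) (μ : Microarch) (hμ : UserX.MicroOK μ) (u₀ : State)
    (hcode : HasCodeNat Lay u₀ Gif.L.DGifDecompressLine.entry Gif.Code.code_DGifDecompressLine.nat
      Gif.L.DGifDecompressLine.size)
    (H : Heap) (rest : List Obj) (frames : List (Nat × FrameLayout)) (F : Forest) (R : Rd) (n m : Nat) (e : State) (ret : Word)
    (h_gpc : Calls Lay μ ProgX.Base.WayInv (ProgX.Base.conv u₀) Gif.L.DGifGetPrefixChar.entry
      (Gif.Spec.DGifGetPrefixChar.spec H rest (DGifDecompressLine.framesIn frames e) F.pv))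
    (v : State) (hat : DGifDecompressLine.Mid Gif.L.DGifDecompressLine.at_106da7 m H rest frames F R n u₀ e ret v) :
    ReachVia Lay μ ProgX.Base.WayInv v
      (DGifDecompressLine.Mid Gif.L.DGifDecompressLine.ret21 m H rest frames F R n u₀ e ret) := by
  obtain ⟨⟨hbody, hloc, h_r14, h_r13, h_rbx, h_rbp, h_w1⟩, h_lt, h_sp0, h_mu⟩ := hat
  -- THE PRELUDE (the same in every segment of this function; Gif/Spec/LzwCarry.lean §2)
  -- the entry state's facts: `he_room`, `he_top`, `he_align`, …
  have he := hbody.entry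
  v_entry he
  have henv : Env H rest frames F R e := hbody.pre.1
  -- where gif and pv are, and that LineLen is an `int`
  have hgin := hbody.gif_inside
  have hpin := hbody.pv_inside
  have hn31 : n < 2 ^ 31 := hbody.len_lt
  -- the present state, in the walker's names
  have w_rip := hbody.rip
  have c_rsp : v.reg .rsp = e.reg .rsp - 200 := hbody.rsp
  have w_eq : Mem.EqOn ProgX.Base.L.textLo ProgX.Base.L.textHi u₀.mem v.mem := ProgX.Base.conv_code_eqOn hbody.code
  have hdf : v.flags .df = false := (show abiInv _ from hbody.abi).1
  have hmx : v.mxcsr &&& 0x1F80 = 0x1F80 := (show abiInv _ from hbody.abi).2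
  have hsse := ProgX.Base.sseOK_of_abiInv hbody.abi
  have w_kept : RegsKept [.rsp] v v := RegsKept.refl _ _
  -- the slot the code loads into `edx`: ClearCode (the slot of LastCode, `[rsp+14H]`, holds any value)
  have k_clear : v.mem.readLE (e.reg .rsp - 184) 4 = GifFilePrivateType.ClearCode v.mem F.pv := hloc.s_clear
  -- THE WALK, to the call's return address
  u_walk hcode [hμ.vendor] until [Gif.L.DGifDecompressLine.ret21]
    span [ProgX.Base.L.textLo, ProgX.Base.L.textHi] side (v_side)
  case call_inv =>
    v_inv
  case pre_106db2 =>
    -- only the return address was pushed since `v`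
    have hs : Mem.SameExcept [⟨(e.reg .rsp).toNat - 560, (e.reg .rsp).toNat - 200⟩] v.mem s_106db2.mem := by
      rw [w_mem]
      u_same
    have henv' : Env H rest (DGifDecompressLine.framesIn frames e) F R s_106db2 := by
      refine henv.at_call hbody.inv hbody.ok hs (by omega) (by omega) ?_ ?_ ?_
      · rw [w_rsp]
        u_omega
      · rw [w_rsp]
        u_omega
      · rw [w_rsp]
        u_omega
    -- the four clauses: `HeapPre`, pv live, `rdi = Prefix`, `edx = ClearCode` not negative
    refine ⟨henv'.heap, hbody.ok.pv_live, ?_, ?_⟩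
    · rw [w_rdi]
      exact h_r13
    · have hcl := hbody.lz.clear
      rw [w_rdx, Gif.Spec.toNat_ofBV_ofNat32 _ (by omega)]
      omega
  -- 0x106db7 (ret21): DGifGetPrefixChar HAS RETURNED; it stored nothing but its own stack, no shadow byte
  have hpost : ShadowUntouched s_106db2.mem s_106db2r.mem := w_post
  v_after_call w_rsp_106db2 w_mem_106db2
  have hsame : Mem.SameExcept [⟨(e.reg .rsp).toNat - 560, (e.reg .rsp).toNat - 200⟩] v.mem s_106db2r.mem := by
    u_same
  have hun : ShadowUntouched v.mem s_106db2r.mem := by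
    v_untouched
  -- `Body`, `Locals` and the measure through the callee's stack window
  obtain ⟨k_body, k_loc, k_mu, k_clear', k_eof⟩ :=
    hbody.carry (cut' := Gif.L.DGifDecompressLine.ret21) w_rip w_rsp w_eq w_inv hun hsame (by dl_scratch)
  -- `Mid` at ret21: the callee-saved registers are what they were
  have e_r14 : s_106db2r.reg .r14 = v.reg .r14 := w_kept.get .r14 rfl
  have e_r13 : s_106db2r.reg .r13 = v.reg .r13 := w_kept.get .r13 rfl
  have e_rbx : s_106db2r.reg .rbx = v.reg .rbx := w_kept.get .rbx rfl
  have e_rbp : s_106db2r.reg .rbp = v.reg .rbp := w_kept.get .rbp rfl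
  refine ReachVia.done ⟨⟨k_body, k_loc hloc, ?_, ?_, ?_, ?_, ?_⟩, ?_, ?_, ?_⟩
  · rw [e_r14]
    exact h_r14
  · rw [e_r13]
    exact h_r13
  · rw [e_rbx]
    exact h_rbx
  · rw [e_rbp]
    exact h_rbp
  · rw [e_rbp, e_rbx]
    exact h_w1
  · rw [e_rbp]
    exact h_lt
  · rw [e_rbx]
    exact h_sp0
  · rw [k_mu]
    exact h_mu

/-- **106DB7H (ret21) … 106E4BH** (dgif_lib.c:934-938): `r12d = eax` (the prefix char), `r15d = StackPtr + 1`; the checked store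
`Stack[StackPtr] =` with `StackPtr = 0` (inside `Stack[4095]`); the load of RunningCode (`2 ≤ RunningCode ≤ 4097` by [LZ3]), the
checked store `Suffix[RunningCode - 2] =` (inside `Suffix[4096]`); `ebx = StackPtr + 1 = 1`, `r12d = CrntPrefix = LastCode`, `i` and
`Private` spilled to `[rsp+38H]` / `[rsp+40H]`, `r15d = ClearCode`: the head of the trace loop, `Trace` with `k = 4094`. -/
theorem dl8_seg_tail (Lay : Layout) (hLay : Lay.hi = 0x1000000) (μ : Microarch) (hμ : UserX.MicroOK μ) (u₀ : State)
    (hcode : HasCodeNat Lay u₀ Gif.L.DGifDecompressLine.entry Gif.Code.code_DGifDecompressLine.nat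
      Gif.L.DGifDecompressLine.size)
    (H : Heap) (rest : List Obj) (frames : List (Nat × FrameLayout)) (F : Forest) (R : Rd) (n m : Nat) (e : State) (ret : Word)
    (h_asan_store1_noabort : Asan.SmallCheck Lay μ ProgX.Base.WayInv (ProgX.Base.CodeOK u₀) [.rax, .rdx] 1
      ProgX.Base.L.__asan_store1_noabort.entry)
    (v : State) (hat : DGifDecompressLine.Mid Gif.L.DGifDecompressLine.ret21 m H rest frames F R n u₀ e ret v) :
    ReachVia Lay μ ProgX.Base.WayInv v
      (fun w => ∃ k, DGifDecompressLine.Trace Gif.L.DGifDecompressLine.at_106e4b m k H rest frames F R n u₀ e ret w) := by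
  obtain ⟨⟨hbody, hloc, h_r14, h_r13, h_rbx, h_rbp, h_w1⟩, h_lt, h_sp0, h_mu⟩ := hat
  -- THE PRELUDE, as in `dl8_seg_call`
  have he := hbody.entry
  v_entry he
  have hgin := hbody.gif_inside
  have hpin := hbody.pv_inside
  have hn31 : n < 2 ^ 31 := hbody.len_lt
  have w_rip := hbody.rip
  have c_rsp : v.reg .rsp = e.reg .rsp - 200 := hbody.rsp
  have w_eq : Mem.EqOn ProgX.Base.L.textLo ProgX.Base.L.textHi u₀.mem v.mem := ProgX.Base.conv_code_eqOn hbody.code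
  have hdf : v.flags .df = false := (show abiInv _ from hbody.abi).1
  have hmx : v.mxcsr &&& 0x1F80 = 0x1F80 := (show abiInv _ from hbody.abi).2
  have hsse := ProgX.Base.sseOK_of_abiInv hbody.abi
  have w_kept : RegsKept [.rsp] v v := RegsKept.refl _ _
  -- `ebx` = StackPtr = 0: `movsxd rbx, ebx` is the register itself (a fact for the walker)
  have hsp31 : (v.reg .rbx).toNat < 2 ^ 31 := by omega
  -- the slots the code loads
  have k_stack : v.mem.readLE (e.reg .rsp - 192) 8 = F.pv + 344 := hloc.s_stack
  have k_suffix : v.mem.readLE (e.reg .rsp - 176) 8 = F.pv + 4439 := hloc.s_suffix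
  have k_clear : v.mem.readLE (e.reg .rsp - 184) 4 = GifFilePrivateType.ClearCode v.mem F.pv := hloc.s_clear
  -- RunningCode, as a number `rc` with [LZ3]
  have hrc_lo := hbody.lz.code_lo
  have hrc_hi := hbody.lz.code_hi
  obtain ⟨rc, hrc⟩ : ∃ rc, GifFilePrivateType.RunningCode v.mem F.pv = rc := ⟨_, rfl⟩
  rw [hrc] at hrc_lo hrc_hi
  -- the load `[r14+14H]` (106DD4H; its check was passed in Segment 7), in the walker's form
  have l_rc : v.mem.readLE (v.reg .r14 + 0x14) 4 = rc := by
    rw [← hrc]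
    simp only [gfield]
    rw [rd_eq_readLE v.mem _ (F.pv + 20) 4 (by u_omega)]
  -- `movsxd rax, [r14+14H]` of a value below `2 ^ 31`: the number itself (a fact for the walker)
  have e_sx : Word.ofBV (BitVec.signExtend 64 (BitVec.ofNat 32 rc)) = UInt64.ofNat rc := by
    have h1 : (BitVec.ofNat 32 rc).toNat = rc := by
      rw [BitVec.toNat_ofNat]
      omega
    rw [Gif.Spec.sext32_bv _ (by omega), h1]
  -- THE WALK, to the head of the trace loop
  u_walk hcode [hμ.vendor, Gif.Spec.sext32_small (v.reg .rbx) hsp31, e_sx]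
    until [Gif.L.DGifDecompressLine.at_106e4b]
    span [ProgX.Base.L.textLo, ProgX.Base.L.textHi] side (v_side)
  -- THE CHECK GOALS: the table is live (`stackLive`, `suffixLive`: the index against THE ARRAY'S OWN count)
  case check_106dcc =>
    -- l.935 `Stack[StackPtr++] =` with `StackPtr = 0`: inside `Stack[4095]`
    have hun : ShadowUntouched v.mem s_106dcc.mem := by v_untouched
    have hl := stackLive hbody.ok.pv_live rest (DGifDecompressLine.framesIn frames e) (v.reg .rbx).toNat (by omega)
    simp only [gfield] at hl
    exact hl.accSmall hbody.inv.shadow hun _ 1 (by decide) (by u_omega) (by u_omega)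
  case check_106de5 =>
    -- l.934 `Suffix[RunningCode - 2] =`: inside `Suffix[4096]` by [LZ3]
    have hun : ShadowUntouched v.mem s_106de5.mem := by v_untouched
    have hl := suffixLive hbody.ok.pv_live rest (DGifDecompressLine.framesIn frames e) (rc - 2) (by omega)
    simp only [gfield] at hl
    exact hl.accSmall hbody.inv.shadow hun _ 1 (by decide) (by u_omega) (by u_omega)
  -- EXIT 0x106e4b (l.955): the head of the trace loop
  -- the values the two spills stored, as numbers
  have e_i : (Word.part .w32 (v.reg .rbp)).toNat = (v.reg .rbp).toNat := by
    rw [toNat_part32]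
    exact Nat.mod_eq_of_lt (by omega)
  rw [e_i, h_r14] at w_mem
  -- what was stored: the return addresses of the two checks, `Stack[0]`, `Suffix[RunningCode - 2]`, the two spill slots
  have hun : ShadowUntouched v.mem s_106e03.mem := by v_untouched
  have hsame : Mem.SameExcept [⟨(e.reg .rsp).toNat - 208, (e.reg .rsp).toNat - 200⟩,
      ⟨(e.reg .rsp).toNat - 144, (e.reg .rsp).toNat - 128⟩, ⟨F.pv + 344, F.pv + 4439⟩, ⟨F.pv + 4439, F.pv + 8535⟩]
      v.mem s_106e03.mem := by
    rw [w_mem]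
    u_same
  have habi : (conv u₀).inv s_106e03 := by
    refine ProgX.Base.abiInv_of ?_ ?_
    · rw [w_flags]
      exact w_df_106de5
    · rw [w_mxcsr]
      exact hmx
  obtain ⟨k_body, k_loc, k_mu, k_clear', k_eof⟩ :=
    hbody.carry (cut' := Gif.L.DGifDecompressLine.at_106e4b) w_rip w_rsp w_eq habi hun hsame (by dl_scratch)
  have hcl := hbody.lz.clear
  -- `Trace` with `k = 4094`: `Body`, `Locals`, then `r13`, `r15`, `rbx`, the two spill slots, the measure
  refine ReachVia.done ⟨4094, k_body, k_loc hloc, ?_, ?_, ?_, ?_, ?_, ?_⟩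
  · rw [w_kept .r13 rfl]
    exact h_r13
  · -- `r15d = ClearCode`: loaded from its slot; the field was not stored to
    rw [w_r15, k_clear', Gif.Spec.toNat_ofBV_ofNat32 _ (by omega)]
  · -- StackPtr + 1 + 4094 = 4095
    rw [w_rbx, Gif.Spec.lea32_succ _ (by omega)]
    omega
  · -- `i` spilled to [rsp+38H] (4 bytes): `i < LineLen`
    have k_i : s_106e03.mem.readLE (e.reg .rsp - 144) 4 = (v.reg .rbp).toNat := by
      u_read
    rw [k_i]
    exact h_lt
  · -- `Private` spilled to [rsp+40H]
    u_read
  · -- the measure: no store of the segment touched it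
    rw [k_mu]
    exact h_mu

end Gif.Spec.DGifDecompressLine_8
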